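-- pv_equiv track=rewrite | github.com/khub-ai/openclaw-knowledge-management | usecases/arc-agi-3/python/object_tracker.py | all_transforms
-- ===== SOURCE A (Python) =====
-- TRANSFORM_NAMES = [
--     "identity",       # 0°
--     "rot90",           # 90° clockwise
--     "rot180",          # 180°
--     "rot270",          # 270° clockwise (= 90° counter-clockwise)
--     "flip_h",          # horizontal mirror (left-right)
--     "flip_v",          # vertical mirror (top-bottom)
--     "flip_main_diag",  # transpose (reflect over main diagonal)
--     "flip_anti_diag",  # reflect over anti-diagonal
-- ]
--
-- def _to_pixel_set(mask: list[list[int]]) -> frozenset[tuple[int, int]]: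
--     """Convert a 2-D binary mask to a frozenset of (row, col) coordinates."""
--     return frozenset(
--         (r, c)
--         for r, row in enumerate(mask)
--         for c, val in enumerate(row)
--         if val
--     )
--
-- def _normalize_pixel_set(
--     pixels: frozenset[tuple[int, int]],
-- ) -> frozenset[tuple[int, int]]:
--     """Translate a pixel set so its bounding box starts at (0, 0)."""
--     if not pixels:
--         return pixels
--     min_r = min(r for r, _ in pixels)
--     min_c = min(c for _, c in pixels)
--     return frozenset((r - min_r, c - min_c) for r, c in pixels)
--
-- def _apply_transform(
--     pixels: frozenset[tuple[int, int]],
--     transform_index: int,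
-- ) -> frozenset[tuple[int, int]]:
--     """Apply one of the 8 D4 symmetry transforms to a pixel set.
--
--     The pixel set is assumed to be origin-normalized (min row/col = 0).
--     The result is re-normalized to origin after transformation.
--     """
--     if not pixels:
--         return pixels
--     max_r = max(r for r, _ in pixels)
--     max_c = max(c for _, c in pixels)
--
--     if transform_index == 0:    # identity
--         return pixels
--     elif transform_index == 1:  # rot90 CW: (r, c) -> (c, max_r - r)
--         out = frozenset((c, max_r - r) for r, c in pixels)
--     elif transform_index == 2:  # rot180: (r, c) -> (max_r - r, max_c - c)
--         out = frozenset((max_r - r, max_c - c) for r, c in pixels)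
--     elif transform_index == 3:  # rot270 CW: (r, c) -> (max_c - c, r)
--         out = frozenset((max_c - c, r) for r, c in pixels)
--     elif transform_index == 4:  # flip_h: (r, c) -> (r, max_c - c)
--         out = frozenset((r, max_c - c) for r, c in pixels)
--     elif transform_index == 5:  # flip_v: (r, c) -> (max_r - r, c)
--         out = frozenset((max_r - r, c) for r, c in pixels)
--     elif transform_index == 6:  # flip_main_diag: (r, c) -> (c, r)
--         out = frozenset((c, r) for r, c in pixels)
--     elif transform_index == 7:  # flip_anti_diag: (r, c) -> (max_c - c, max_r - r)
--         out = frozenset((max_c - c, max_r - r) for r, c in pixels)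
--     else:
--         raise ValueError(f"Invalid transform_index: {transform_index}")
--
--     return _normalize_pixel_set(out)
--
-- def all_transforms(
--     mask: list[list[int]],
-- ) -> list[tuple[str, frozenset[tuple[int, int]]]]:
--     """Generate all 8 D4 transforms of a binary mask.
--
--     Returns a list of (transform_name, normalized_pixel_set) tuples.
--     """
--     base = _normalize_pixel_set(_to_pixel_set(mask))
--     return [
--         (TRANSFORM_NAMES[i], _apply_transform(base, i))
--         for i in range(8)
--     ]
-- ===== SOURCE B (Python) =====
-- TRANSFORM_NAMES = [
--     "identity", "rot90", "rot180", "rot270",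
--     "flip_h", "flip_v", "flip_main_diag", "flip_anti_diag",
-- ]
--
-- def _to_pixel_set(mask):
--     return frozenset(
--         (r, c)
--         for r, row in enumerate(mask)
--         for c, val in enumerate(row)
--         if val
--     )
--
-- def _normalize(pixels):
--     if not pixels:
--         return pixels
--     min_r = min(r for r, _ in pixels)
--     min_c = min(c for _, c in pixels)
--     return frozenset((r - min_r, c - min_c) for r, c in pixels)
--
-- def _rot90(pixels):
--     """Rotate an origin-normalized pixel set 90° clockwise, re-normalized."""
--     if not pixels:
--         return pixels
--     max_r = max(r for r, _ in pixels)
--     return _normalize(frozenset((c, max_r - r) for r, c in pixels))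
--
-- def _transpose(pixels):
--     """Reflect an origin-normalized pixel set over the main diagonal."""
--     if not pixels:
--         return pixels
--     return _normalize(frozenset((c, r) for r, c in pixels))
--
-- def all_transforms(mask):
--     base = _normalize(_to_pixel_set(mask))
--     r1 = _rot90(base)
--     r2 = _rot90(r1)
--     r3 = _rot90(r2)
--     t = _transpose(base)
--     h = _rot90(t)
--     ad = _rot90(h)
--     v = _rot90(ad)
--     return [
--         ("identity", base), ("rot90", r1), ("rot180", r2), ("rot270", r3),
--         ("flip_h", h), ("flip_v", v),
--         ("flip_main_diag", t), ("flip_anti_diag", ad),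
--     ]
-- ===== Notes on version B (the rewrite author's own statement) =====
-- stated objective: alternative
-- what changed: Replaces the 8-way index dispatch of closed-form coordinate maps by two group generators (rot90 and transpose) over the normalized pixel set, generating the four rotations by iterating rot90 and the four reflections by rotating the transpose.
import Mathlib
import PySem

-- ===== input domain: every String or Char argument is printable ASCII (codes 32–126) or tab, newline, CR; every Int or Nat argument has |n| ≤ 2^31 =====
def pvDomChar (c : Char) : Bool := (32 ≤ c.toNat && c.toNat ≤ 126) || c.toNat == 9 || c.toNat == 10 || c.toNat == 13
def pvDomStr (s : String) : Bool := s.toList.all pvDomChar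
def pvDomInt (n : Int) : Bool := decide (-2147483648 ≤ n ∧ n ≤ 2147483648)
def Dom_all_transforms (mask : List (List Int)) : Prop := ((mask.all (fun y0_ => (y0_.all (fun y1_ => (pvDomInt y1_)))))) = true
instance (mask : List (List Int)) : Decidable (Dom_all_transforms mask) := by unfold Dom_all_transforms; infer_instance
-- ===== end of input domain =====

-- B replaces A's 8-way index dispatch of closed-form coordinate maps by two group
-- generators (rot90 and transpose) composed to produce the 8 D4 transforms (objective:
-- alternative decomposition, same cost).

-- ===== PORT A =====
def pvNamesA : List String :=
  ["identity", "rot90", "rot180", "rot270", "flip_h", "flip_v", "flip_main_diag", "flip_anti_diag"]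

def pvToPixelSetA (mask : List (List Int)) : List (Int × Int) :=
  PySem.Set.ofList ((PySem.List.enumerate mask).flatMap (fun rrow =>
    (PySem.List.enumerate rrow.2).filterMap (fun cval =>
      if cval.2 ≠ 0 then some (rrow.1, cval.1) else none)))

def pvNormalizeA (p : List (Int × Int)) : List (Int × Int) :=
  if p = [] then p else
    let minr := (PySem.List.min? (p.map (fun x => x.1)) (fun x => x)).getD 0
    let minc := (PySem.List.min? (p.map (fun x => x.2)) (fun x => x)).getD 0
    PySem.Set.ofList (p.map (fun x => (x.1 - minr, x.2 - minc)))

def pvApplyTransformA (p : List (Int × Int)) (i : Int) : List (Int × Int) :=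
  if p = [] then p else
    let maxr := (PySem.List.max? (p.map (fun x => x.1)) (fun x => x)).getD 0
    let maxc := (PySem.List.max? (p.map (fun x => x.2)) (fun x => x)).getD 0
    if i = 0 then p
    else if i = 1 then pvNormalizeA (PySem.Set.ofList (p.map (fun x => (x.2, maxr - x.1))))
    else if i = 2 then pvNormalizeA (PySem.Set.ofList (p.map (fun x => (maxr - x.1, maxc - x.2))))
    else if i = 3 then pvNormalizeA (PySem.Set.ofList (p.map (fun x => (maxc - x.2, x.1))))
    else if i = 4 then pvNormalizeA (PySem.Set.ofList (p.map (fun x => (x.1, maxc - x.2))))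
    else if i = 5 then pvNormalizeA (PySem.Set.ofList (p.map (fun x => (maxr - x.1, x.2))))
    else if i = 6 then pvNormalizeA (PySem.Set.ofList (p.map (fun x => (x.2, x.1))))
    else if i = 7 then pvNormalizeA (PySem.Set.ofList (p.map (fun x => (maxc - x.2, maxr - x.1))))
    else []  -- Python raises ValueError here; unreachable: all_transforms only passes 0..7

def all_transforms (mask : List (List Int)) : List (String × (List (Int × Int))) :=
  let base := pvNormalizeA (pvToPixelSetA mask)
  (PySem.List.pyRange 0 8 1).map (fun i =>
    ((PySem.List.pyGet? pvNamesA i).getD "", pvApplyTransformA base i))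

-- ===== PORT B =====
def pvToPixelSetB (mask : List (List Int)) : List (Int × Int) :=
  PySem.Set.ofList ((PySem.List.enumerate mask).flatMap (fun rrow =>
    (PySem.List.enumerate rrow.2).filterMap (fun cval =>
      if cval.2 ≠ 0 then some (rrow.1, cval.1) else none)))

def pvNormalizeB (p : List (Int × Int)) : List (Int × Int) :=
  if p = [] then p else
    let minr := (PySem.List.min? (p.map (fun x => x.1)) (fun x => x)).getD 0
    let minc := (PySem.List.min? (p.map (fun x => x.2)) (fun x => x)).getD 0
    PySem.Set.ofList (p.map (fun x => (x.1 - minr, x.2 - minc)))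

def pvRot90B (p : List (Int × Int)) : List (Int × Int) :=
  if p = [] then p else
    let maxr := (PySem.List.max? (p.map (fun x => x.1)) (fun x => x)).getD 0
    pvNormalizeB (PySem.Set.ofList (p.map (fun x => (x.2, maxr - x.1))))

def pvTransposeB (p : List (Int × Int)) : List (Int × Int) :=
  if p = [] then p else
    pvNormalizeB (PySem.Set.ofList (p.map (fun x => (x.2, x.1))))

def all_transforms_alt (mask : List (List Int)) : List (String × (List (Int × Int))) :=
  let base := pvNormalizeB (pvToPixelSetB mask)
  let r1 := pvRot90B base
  let r2 := pvRot90B r1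
  let r3 := pvRot90B r2
  let t := pvTransposeB base
  let h := pvRot90B t
  let ad := pvRot90B h
  let v := pvRot90B ad
  [("identity", base), ("rot90", r1), ("rot180", r2), ("rot270", r3),
   ("flip_h", h), ("flip_v", v), ("flip_main_diag", t), ("flip_anti_diag", ad)]

-- ===== PRECONDITION & SPEC =====
def Spec_all_transforms (mask : List (List Int)) (out : List (String × (List (Int × Int)))) : Prop := out = all_transforms_alt mask
instance (mask : List (List Int)) (out : List (String × (List (Int × Int)))) : Decidable (Spec_all_transforms mask out) := by unfold Spec_all_transforms; infer_instance

-- ===== CLAIM (what is proved, stated in full; the proofs are below) =====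
def Claim_equal_all_transforms : Prop := ∀ (mask : List (List Int)), Dom_all_transforms mask → Spec_all_transforms mask (all_transforms mask)

-- ===== LEMMAS AND PROOFS =====

-- characterization of max?/min? with the identity key on Int (value is unique)
theorem pv_max_char (l : List Int) (m : Int) :
    PySem.List.max? l (fun x => x) = some m ↔ m ∈ l ∧ ∀ y ∈ l, y ≤ m := by
  constructor
  · intro h
    exact ⟨PySem.List.max?_mem h, fun y hy => PySem.List.max?_isMax h y hy⟩
  · rintro ⟨hm, hmax⟩
    rcases hq : PySem.List.max? l (fun x => x) with _ | q
    · rw [PySem.List.max?_eq_none_iff] at hq; subst hq; simp at hm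
    · have h1 : q ≤ m := hmax q (PySem.List.max?_mem hq)
      have h2 : m ≤ q := PySem.List.max?_isMax hq m hm
      exact congrArg some (le_antisymm h1 h2)
theorem pv_min_char (l : List Int) (m : Int) :
    PySem.List.min? l (fun x => x) = some m ↔ m ∈ l ∧ ∀ y ∈ l, m ≤ y := by
  constructor
  · intro h
    exact ⟨PySem.List.min?_mem h, fun y hy => PySem.List.min?_isMin h y hy⟩
  · rintro ⟨hm, hmin⟩
    rcases hq : PySem.List.min? l (fun x => x) with _ | q
    · rw [PySem.List.min?_eq_none_iff] at hq; subst hq; simp at hm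
    · have h1 : m ≤ q := hmin q (PySem.List.min?_mem hq)
      have h2 : q ≤ m := PySem.List.min?_isMin hq m hm
      exact congrArg some (le_antisymm h2 h1)

theorem pv_min_map_sub_const (l : List Int) (k m : Int)
    (h : PySem.List.max? l (fun x => x) = some m) :
    PySem.List.min? (l.map (fun x => k - x)) (fun x => x) = some (k - m) := by
  rw [pv_max_char] at h
  rw [pv_min_char]
  constructor
  · exact List.mem_map.mpr ⟨m, h.1, rfl⟩
  · intro y hy
    rcases List.mem_map.mp hy with ⟨x, hx, rfl⟩
    have := h.2 x hx; omega
theorem pv_max_map_sub_const (l : List Int) (k m : Int)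
    (h : PySem.List.min? l (fun x => x) = some m) :
    PySem.List.max? (l.map (fun x => k - x)) (fun x => x) = some (k - m) := by
  rw [pv_min_char] at h
  rw [pv_max_char]
  constructor
  · exact List.mem_map.mpr ⟨m, h.1, rfl⟩
  · intro y hy
    rcases List.mem_map.mp hy with ⟨x, hx, rfl⟩
    have := h.2 x hx; omega
theorem pv_min_map_sub_right (l : List Int) (k m : Int)
    (h : PySem.List.min? l (fun x => x) = some m) :
    PySem.List.min? (l.map (fun x => x - k)) (fun x => x) = some (m - k) := by
  rw [pv_min_char] at h
  rw [pv_min_char]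
  constructor
  · exact List.mem_map.mpr ⟨m, h.1, rfl⟩
  · intro y hy
    rcases List.mem_map.mp hy with ⟨x, hx, rfl⟩
    have := h.2 x hx; omega

-- normalize is the identity on a nonempty nodup list whose row and column minima are 0
theorem pv_normalize_id (p : List (Int × Int)) (hne : p ≠ []) (hnd : p.Nodup)
    (hr : PySem.List.min? (p.map (fun x => x.1)) (fun x => x) = some 0)
    (hc : PySem.List.min? (p.map (fun x => x.2)) (fun x => x) = some 0) :
    pvNormalizeA p = p := by
  unfold pvNormalizeA
  rw [if_neg hne, hr, hc]
  simp only [Option.getD_some]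
  have : p.map (fun x => (x.1 - 0, x.2 - 0)) = p := by
    simp
  rw [this, PySem.Set.ofList_eq_self_of_nodup _ hnd]

theorem pvNormalizeB_eq (p : List (Int × Int)) : pvNormalizeB p = pvNormalizeA p := rfl

-- the shape every transform reduces to, when the result is known to be origin-normalized
theorem pv_norm_ofList_map (p : List (Int × Int)) (f : Int × Int → Int × Int)
    (hinj : Function.Injective f) (hne : p ≠ []) (hnd : p.Nodup)
    (hr : PySem.List.min? ((p.map f).map (fun x => x.1)) (fun x => x) = some 0)
    (hc : PySem.List.min? ((p.map f).map (fun x => x.2)) (fun x => x) = some 0) :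
    pvNormalizeA (PySem.Set.ofList (p.map f)) = p.map f := by
  have hnd' : (p.map f).Nodup := hnd.map hinj
  rw [PySem.Set.ofList_eq_self_of_nodup _ hnd']
  exact pv_normalize_id _ (by simpa using hne) hnd' hr hc

-- all data about a normalized nonempty pixel list, with its row/col maxima
def pvGood (p : List (Int × Int)) (mr mc : Int) : Prop :=
  p ≠ [] ∧ p.Nodup ∧
  PySem.List.min? (p.map (fun x => x.1)) (fun x => x) = some 0 ∧
  PySem.List.min? (p.map (fun x => x.2)) (fun x => x) = some 0 ∧
  PySem.List.max? (p.map (fun x => x.1)) (fun x => x) = some mr ∧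
  PySem.List.max? (p.map (fun x => x.2)) (fun x => x) = some mc

theorem pv_good_map (p : List (Int × Int)) (mr mc : Int) (h : pvGood p mr mc)
    (f : Int × Int → Int × Int) (hinj : Function.Injective f)
    (hr0 : PySem.List.min? ((p.map f).map (fun x => x.1)) (fun x => x) = some 0)
    (hc0 : PySem.List.min? ((p.map f).map (fun x => x.2)) (fun x => x) = some 0)
    (mr' mc' : Int)
    (hrM : PySem.List.max? ((p.map f).map (fun x => x.1)) (fun x => x) = some mr')
    (hcM : PySem.List.max? ((p.map f).map (fun x => x.2)) (fun x => x) = some mc') :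
    pvGood (p.map f) mr' mc' :=
  ⟨by simpa using h.1, h.2.1.map hinj, hr0, hc0, hrM, hcM⟩

-- rot90 on a normalized list: its value as a map, and the normalization data of the result
theorem pv_rot90_eq (p : List (Int × Int)) (mr mc : Int) (h : pvGood p mr mc) :
    pvRot90B p = p.map (fun x => (x.2, mr - x.1)) ∧
    pvGood (p.map (fun x => (x.2, mr - x.1))) mc mr := by
  obtain ⟨hne, hnd, hminr, hminc, hmaxr, hmaxc⟩ := h
  have hinj : Function.Injective (fun x : Int × Int => (x.2, mr - x.1)) := by
    intro a b hab
    simp only [Prod.mk.injEq] at hab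
    exact Prod.ext (by omega) hab.1
  have hrows : (p.map (fun x : Int × Int => (x.2, mr - x.1))).map (fun x => x.1)
      = p.map (fun x => x.2) := by simp [List.map_map, Function.comp]
  have hcols : (p.map (fun x : Int × Int => (x.2, mr - x.1))).map (fun x => x.2)
      = (p.map (fun x => x.1)).map (fun x => mr - x) := by simp [List.map_map, Function.comp]
  have hr0 : PySem.List.min? ((p.map (fun x : Int × Int => (x.2, mr - x.1))).map (fun x => x.1)) (fun x => x) = some 0 := by
    rw [hrows]; exact hminc
  have hc0 : PySem.List.min? ((p.map (fun x : Int × Int => (x.2, mr - x.1))).map (fun x => x.2)) (fun x => x) = some 0 := by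
    rw [hcols]
    have := pv_min_map_sub_const _ mr mr hmaxr
    simpa using this
  have hrM : PySem.List.max? ((p.map (fun x : Int × Int => (x.2, mr - x.1))).map (fun x => x.1)) (fun x => x) = some mc := by
    rw [hrows]; exact hmaxc
  have hcM : PySem.List.max? ((p.map (fun x : Int × Int => (x.2, mr - x.1))).map (fun x => x.2)) (fun x => x) = some mr := by
    rw [hcols]
    have := pv_max_map_sub_const _ mr 0 hminr
    simpa using this
  refine ⟨?_, pv_good_map p mr mc ⟨hne, hnd, hminr, hminc, hmaxr, hmaxc⟩ _ hinj hr0 hc0 mc mr hrM hcM⟩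
  unfold pvRot90B
  rw [if_neg hne, hmaxr]
  simp only [Option.getD_some]
  rw [pvNormalizeB_eq]
  exact pv_norm_ofList_map p _ hinj hne hnd hr0 hc0

-- transpose on a normalized list
theorem pv_transpose_eq (p : List (Int × Int)) (mr mc : Int) (h : pvGood p mr mc) :
    pvTransposeB p = p.map (fun x => (x.2, x.1)) ∧
    pvGood (p.map (fun x => (x.2, x.1))) mc mr := by
  obtain ⟨hne, hnd, hminr, hminc, hmaxr, hmaxc⟩ := h
  have hinj : Function.Injective (fun x : Int × Int => (x.2, x.1)) := by
    intro a b hab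
    simp only [Prod.mk.injEq] at hab
    exact Prod.ext hab.2 hab.1
  have hrows : (p.map (fun x : Int × Int => (x.2, x.1))).map (fun x => x.1)
      = p.map (fun x => x.2) := by simp [List.map_map, Function.comp]
  have hcols : (p.map (fun x : Int × Int => (x.2, x.1))).map (fun x => x.2)
      = p.map (fun x => x.1) := by simp [List.map_map, Function.comp]
  have hr0 : PySem.List.min? ((p.map (fun x : Int × Int => (x.2, x.1))).map (fun x => x.1)) (fun x => x) = some 0 := by rw [hrows]; exact hminc
  have hc0 : PySem.List.min? ((p.map (fun x : Int × Int => (x.2, x.1))).map (fun x => x.2)) (fun x => x) = some 0 := by rw [hcols]; exact hminr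
  have hrM : PySem.List.max? ((p.map (fun x : Int × Int => (x.2, x.1))).map (fun x => x.1)) (fun x => x) = some mc := by rw [hrows]; exact hmaxc
  have hcM : PySem.List.max? ((p.map (fun x : Int × Int => (x.2, x.1))).map (fun x => x.2)) (fun x => x) = some mr := by rw [hcols]; exact hmaxr
  refine ⟨?_, pv_good_map p mr mc ⟨hne, hnd, hminr, hminc, hmaxr, hmaxc⟩ _ hinj hr0 hc0 mc mr hrM hcM⟩
  unfold pvTransposeB
  rw [if_neg hne]
  rw [pvNormalizeB_eq]
  exact pv_norm_ofList_map p _ hinj hne hnd hr0 hc0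

theorem pv_max_map_sub_right (l : List Int) (k m : Int)
    (h : PySem.List.max? l (fun x => x) = some m) :
    PySem.List.max? (l.map (fun x => x - k)) (fun x => x) = some (m - k) := by
  rw [pv_max_char] at h
  rw [pv_max_char]
  constructor
  · exact List.mem_map.mpr ⟨m, h.1, rfl⟩
  · intro y hy
    rcases List.mem_map.mp hy with ⟨x, hx, rfl⟩
    have := h.2 x hx; omega

-- normalizing a nonempty nodup pixel list yields a pvGood list
theorem pv_normalize_good (s : List (Int × Int)) (hne : s ≠ []) (hnd : s.Nodup) :
    ∃ mr mc, pvGood (pvNormalizeA s) mr mc := by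
  rcases hm1 : PySem.List.min? (s.map (fun x => x.1)) (fun x => x) with _ | m1
  · rw [PySem.List.min?_eq_none_iff] at hm1; simp at hm1; exact absurd hm1 hne
  rcases hm2 : PySem.List.min? (s.map (fun x => x.2)) (fun x => x) with _ | m2
  · rw [PySem.List.min?_eq_none_iff] at hm2; simp at hm2; exact absurd hm2 hne
  rcases hM1 : PySem.List.max? (s.map (fun x => x.1)) (fun x => x) with _ | M1
  · rw [PySem.List.max?_eq_none_iff] at hM1; simp at hM1; exact absurd hM1 hne
  rcases hM2 : PySem.List.max? (s.map (fun x => x.2)) (fun x => x) with _ | M2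
  · rw [PySem.List.max?_eq_none_iff] at hM2; simp at hM2; exact absurd hM2 hne
  have hinj : Function.Injective (fun x : Int × Int => (x.1 - m1, x.2 - m2)) := by
    intro a b hab
    simp only [Prod.mk.injEq] at hab
    exact Prod.ext (by omega) (by omega)
  have hnd' : (s.map (fun x : Int × Int => (x.1 - m1, x.2 - m2))).Nodup := hnd.map hinj
  have heq : pvNormalizeA s = s.map (fun x => (x.1 - m1, x.2 - m2)) := by
    unfold pvNormalizeA
    rw [if_neg hne, hm1, hm2]
    simp only [Option.getD_some]
    exact PySem.Set.ofList_eq_self_of_nodup _ hnd'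
  have hrows : (s.map (fun x : Int × Int => (x.1 - m1, x.2 - m2))).map (fun x => x.1)
      = (s.map (fun x => x.1)).map (fun x => x - m1) := by simp [List.map_map, Function.comp]
  have hcols : (s.map (fun x : Int × Int => (x.1 - m1, x.2 - m2))).map (fun x => x.2)
      = (s.map (fun x => x.2)).map (fun x => x - m2) := by simp [List.map_map, Function.comp]
  refine ⟨M1 - m1, M2 - m2, ?_, ?_, ?_, ?_, ?_, ?_⟩ <;> rw [heq]
  · simp [hne]
  · exact hnd'
  · rw [hrows]
    have := pv_min_map_sub_right _ m1 m1 hm1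
    simpa using this
  · rw [hcols]
    have := pv_min_map_sub_right _ m2 m2 hm2
    simpa using this
  · rw [hrows]; exact pv_max_map_sub_right _ m1 M1 hM1
  · rw [hcols]; exact pv_max_map_sub_right _ m2 M2 hM2

-- A's transform, index by index, as a plain map over a pvGood list
theorem pv_apply_eq (p : List (Int × Int)) (mr mc : Int) (h : pvGood p mr mc) :
    pvApplyTransformA p 0 = p ∧
    pvApplyTransformA p 1 = p.map (fun x => (x.2, mr - x.1)) ∧
    pvApplyTransformA p 2 = p.map (fun x => (mr - x.1, mc - x.2)) ∧
    pvApplyTransformA p 3 = p.map (fun x => (mc - x.2, x.1)) ∧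
    pvApplyTransformA p 4 = p.map (fun x => (x.1, mc - x.2)) ∧
    pvApplyTransformA p 5 = p.map (fun x => (mr - x.1, x.2)) ∧
    pvApplyTransformA p 6 = p.map (fun x => (x.2, x.1)) ∧
    pvApplyTransformA p 7 = p.map (fun x => (mc - x.2, mr - x.1)) := by
  obtain ⟨hne, hnd, hminr, hminc, hmaxr, hmaxc⟩ := h
  have hC : PySem.List.min? ((p.map (fun x => x.1)).map (fun x => mr - x)) (fun x => x) = some 0 := by
    have := pv_min_map_sub_const _ mr mr hmaxr; simpa using this
  have hD : PySem.List.min? ((p.map (fun x => x.2)).map (fun x => mc - x)) (fun x => x) = some 0 := by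
    have := pv_min_map_sub_const _ mc mc hmaxc; simpa using this
  have unf : ∀ i : Int, pvApplyTransformA p i =
      (if i = 0 then p
      else if i = 1 then pvNormalizeA (PySem.Set.ofList (p.map (fun x => (x.2, mr - x.1))))
      else if i = 2 then pvNormalizeA (PySem.Set.ofList (p.map (fun x => (mr - x.1, mc - x.2))))
      else if i = 3 then pvNormalizeA (PySem.Set.ofList (p.map (fun x => (mc - x.2, x.1))))
      else if i = 4 then pvNormalizeA (PySem.Set.ofList (p.map (fun x => (x.1, mc - x.2))))
      else if i = 5 then pvNormalizeA (PySem.Set.ofList (p.map (fun x => (mr - x.1, x.2))))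
      else if i = 6 then pvNormalizeA (PySem.Set.ofList (p.map (fun x => (x.2, x.1))))
      else if i = 7 then pvNormalizeA (PySem.Set.ofList (p.map (fun x => (mc - x.2, mr - x.1))))
      else []) := by
    intro i
    unfold pvApplyTransformA
    rw [if_neg hne, hmaxr, hmaxc]
    rfl
  refine ⟨?_, ?_, ?_, ?_, ?_, ?_, ?_, ?_⟩ <;> rw [unf] <;> norm_num
  · exact pv_norm_ofList_map p _
      (fun a b hab => by simp only [Prod.mk.injEq] at hab; exact Prod.ext (by omega) (by omega)) hne hnd
      (by simpa [List.map_map, Function.comp] using hminc)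
      (by simpa [List.map_map, Function.comp] using hC)
  · exact pv_norm_ofList_map p _
      (fun a b hab => by simp only [Prod.mk.injEq] at hab; exact Prod.ext (by omega) (by omega)) hne hnd
      (by simpa [List.map_map, Function.comp] using hC)
      (by simpa [List.map_map, Function.comp] using hD)
  · exact pv_norm_ofList_map p _
      (fun a b hab => by simp only [Prod.mk.injEq] at hab; exact Prod.ext (by omega) (by omega)) hne hnd
      (by simpa [List.map_map, Function.comp] using hD)
      (by simpa [List.map_map, Function.comp] using hminr)
  · exact pv_norm_ofList_map p _
      (fun a b hab => by simp only [Prod.mk.injEq] at hab; exact Prod.ext (by omega) (by omega)) hne hnd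
      (by simpa [List.map_map, Function.comp] using hminr)
      (by simpa [List.map_map, Function.comp] using hD)
  · exact pv_norm_ofList_map p _
      (fun a b hab => by simp only [Prod.mk.injEq] at hab; exact Prod.ext (by omega) (by omega)) hne hnd
      (by simpa [List.map_map, Function.comp] using hC)
      (by simpa [List.map_map, Function.comp] using hminc)
  · exact pv_norm_ofList_map p _
      (fun a b hab => by simp only [Prod.mk.injEq] at hab; exact Prod.ext (by omega) (by omega)) hne hnd
      (by simpa [List.map_map, Function.comp] using hminc)
      (by simpa [List.map_map, Function.comp] using hminr)
  · exact pv_norm_ofList_map p _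
      (fun a b hab => by simp only [Prod.mk.injEq] at hab; exact Prod.ext (by omega) (by omega)) hne hnd
      (by simpa [List.map_map, Function.comp] using hD)
      (by simpa [List.map_map, Function.comp] using hC)

theorem all_transforms_spec : Claim_equal_all_transforms := by
  intro mask _
  show all_transforms mask = all_transforms_alt mask
  have hTP : pvToPixelSetB mask = pvToPixelSetA mask := rfl
  by_cases hs : pvToPixelSetA mask = []
  · have hbase : pvNormalizeA (pvToPixelSetA mask) = [] := by rw [hs]; rfl
    have hbB : pvNormalizeB (pvToPixelSetB mask) = [] := by
      rw [hTP, pvNormalizeB_eq]; exact hbase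
    simp only [all_transforms, all_transforms_alt, hbase, hbB]
    rfl
  · have hnd : (pvToPixelSetA mask).Nodup := by
      unfold pvToPixelSetA; exact PySem.Set.nodup_ofList _
    obtain ⟨mr, mc, hg⟩ := pv_normalize_good _ hs hnd
    obtain ⟨ha0, ha1, ha2, ha3, ha4, ha5, ha6, ha7⟩ :=
      pv_apply_eq (pvNormalizeA (pvToPixelSetA mask)) mr mc hg
    -- B's chain of generators, flattened with map_map
    obtain ⟨hr1, g1⟩ := pv_rot90_eq _ mr mc hg
    obtain ⟨hr2, g2⟩ := pv_rot90_eq _ mc mr g1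
    obtain ⟨hr3, g3⟩ := pv_rot90_eq _ mr mc g2
    obtain ⟨ht, gt⟩ := pv_transpose_eq _ mr mc hg
    obtain ⟨hh, gh⟩ := pv_rot90_eq _ mc mr gt
    obtain ⟨had, gad⟩ := pv_rot90_eq _ mr mc gh
    obtain ⟨hv, gv⟩ := pv_rot90_eq _ mc mr gad
    have hbB : pvNormalizeB (pvToPixelSetB mask) = pvNormalizeA (pvToPixelSetA mask) := by
      rw [hTP, pvNormalizeB_eq]
    simp only [all_transforms, all_transforms_alt, hbB]
    rw [hr1, hr2, hr3, ht, hh, had, hv]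
    rw [show PySem.List.pyRange 0 8 = [0, 1, 2, 3, 4, 5, 6, 7] from rfl]
    simp only [List.map_cons, List.map_nil]
    rw [ha0, ha1, ha2, ha3, ha4, ha5, ha6, ha7]
    simp only [List.map_map, Function.comp_def, sub_sub_cancel]
    rfl
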